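-- pv_equiv track=rewrite | github.com/EdgarLira25/leetcode | leetcode/2660/determinate-the-winner-of-bowling-game.py | calc
-- ===== SOURCE A (Python) =====
-- def calc(player) -> int:
--     double = False
--     turn = -15
--     points = 0
--     for index, point in enumerate(player):
--         points += point if not double else point * 2
--         if index - 2 == turn:
--             double = False
--         if point == 10:
--             turn = index
--             double = True
--     return points
-- ===== SOURCE B (Python) =====
-- def calc(player) -> int:
--     # stateless: a roll is doubled iff one of the previous two rolls was a strike
--     prev1 = [0] + player        # 0 is a pad value (never equals 10)
--     prev2 = [0, 0] + player
--     return sum(p * 2 if a == 10 or b == 10 else p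
--                for p, a, b in zip(player, prev1, prev2))
-- ===== Notes on version B (the rewrite author's own statement) =====
-- stated objective: simpler
-- what changed: A maintains cross-iteration state (a double flag and a turn index cleared two rolls after a strike); B keeps no state at all and sums the rolls, doubling a roll exactly when one of the two preceding rolls (via zipping with shifted copies) is a strike.
import Mathlib
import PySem

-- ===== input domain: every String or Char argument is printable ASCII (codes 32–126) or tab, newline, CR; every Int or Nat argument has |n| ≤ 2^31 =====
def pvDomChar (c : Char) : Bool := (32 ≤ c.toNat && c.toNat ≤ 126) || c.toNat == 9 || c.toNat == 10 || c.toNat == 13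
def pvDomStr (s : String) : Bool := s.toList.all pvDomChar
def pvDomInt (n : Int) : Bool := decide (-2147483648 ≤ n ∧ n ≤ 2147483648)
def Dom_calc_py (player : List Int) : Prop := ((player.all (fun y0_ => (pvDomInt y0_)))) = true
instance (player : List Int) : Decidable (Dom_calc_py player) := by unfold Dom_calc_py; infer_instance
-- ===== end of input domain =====

-- B drops A's cross-iteration flag/turn state: a roll is doubled iff one of the two previous rolls is 10.
-- Equivalence of the return value is proved for all inputs in the domain.
-- ===== PORT A =====
def calcLoopA : List Int → Int → Bool → Int → Int → Int
  | [], _, _, _, points => points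
  | point :: rest, index, double, turn, points =>
    let points := points + (if !double then point else point * 2)
    let double := if index - 2 = turn then false else double
    let turn' := if point = 10 then index else turn
    let double := if point = 10 then true else double
    calcLoopA rest (index + 1) double turn' points

def calc_py (player : List Int) : Int := calcLoopA player 0 false (-15) 0

-- ===== PORT B =====
def calc_py_alt (player : List Int) : Int :=
  ((player.zip (((0 : Int) :: player).zip ((0 : Int) :: (0 : Int) :: player))).foldl
    (fun s t => s + (if t.2.1 = 10 ∨ t.2.2 = 10 then t.1 * 2 else t.1)) 0)

-- ===== PRECONDITION & SPEC =====
def Spec_calc_py (player : List Int) (out : Int) : Prop := out = calc_py_alt player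
instance (player : List Int) (out : Int) : Decidable (Spec_calc_py player out) := by unfold Spec_calc_py; infer_instance

-- ===== CLAIM (what is proved, stated in full; the proofs are below) =====
def Claim_equal_calc_py : Prop := ∀ (player : List Int), Dom_calc_py player → Spec_calc_py player (calc_py player)

-- ===== LEMMAS AND PROOFS =====
-- Loop invariant: at index i, A's flag equals "previous roll a or the one before it b is a strike",
-- and A's turn is i-1 if a = 10, i-2 if (only) b = 10, and ≤ i-3 otherwise.
lemma calcLoopA_eq_foldl : ∀ (l : List Int) (i turn acc a b : Int),
    (if a = 10 then turn = i - 1 else if b = 10 then turn = i - 2 else turn ≤ i - 3) →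
    calcLoopA l i (decide (a = 10 ∨ b = 10)) turn acc
      = (l.zip ((a :: l).zip (b :: a :: l))).foldl
          (fun s t => s + (if t.2.1 = 10 ∨ t.2.2 = 10 then t.1 * 2 else t.1)) acc := by
  intro l
  induction l with
  | nil => intro _ _ _ _ _ _; rfl
  | cons p rest ih =>
    intro i turn acc a b hinv
    simp only [calcLoopA, List.zip_cons_cons, List.foldl_cons]
    have hstep : (acc + (if !decide (a = 10 ∨ b = 10) then p else p * 2))
        = acc + (if a = 10 ∨ b = 10 then p * 2 else p) := by
      by_cases h : a = 10 ∨ b = 10 <;> simp [h]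
    rw [hstep]
    by_cases hp : p = 10
    · subst hp
      simp only [decide_eq_true_eq]
      have := ih (i + 1) i (acc + (if a = 10 ∨ b = 10 then (10:Int) * 2 else 10)) 10 a
        (by norm_num)
      simpa using this
    · simp only [if_neg hp]
      have hnew : (if i - 2 = turn then false else decide (a = 10 ∨ b = 10))
          = decide (p = 10 ∨ a = 10) := by
        by_cases ha : a = 10
        · have hne : ¬ (i - 2 = turn) := by
            simp [ha] at hinv; omega
          simp [hne, ha]
        · by_cases hb : b = 10
          · have : turn = i - 2 := by simp [ha, hb] at hinv; exact hinv
            simp [this, ha, hp]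
          · by_cases hc : i - 2 = turn <;> simp [hc, ha, hb, hp]
      rw [hnew]
      exact ih (i + 1) turn _ p a (by
        by_cases ha : a = 10 <;> by_cases hb : b = 10 <;>
          simp [ha, hb, hp] at hinv ⊢ <;> omega)

-- ===== VERDICT (by name: the statement is the Claim_ definition above) =====
theorem calc_py_spec : Claim_equal_calc_py := by
  intro player _
  unfold Spec_calc_py calc_py calc_py_alt
  have h := calcLoopA_eq_foldl player 0 (-15) 0 0 0 (by norm_num)
  simpa using h
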